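-- pv_equiv track=rewrite | github.com/PRADALAND/nurse-schedule-chatbot | pages/1_Chatbot.py | compute_consecutive_night_shifts
-- ===== SOURCE A (Python) =====
-- def compute_consecutive_night_shifts(norm_codes):
--     """
--     consecutive_night_shifts (코드북):
--       Critical: 5
--       Moderate: 4
--       Low: 3
--       No: 2 이하
--     """
--     max_n_streak = 0
--     cur = 0
--     for c in norm_codes:
--         if c == "N":
--             cur += 1
--             max_n_streak = max(max_n_streak, cur)
--         else:
--             cur = 0
--
--     if max_n_streak >= 5:
--         risk = "Critical"
--     elif max_n_streak == 4:
--         risk = "Moderate"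
--     elif max_n_streak == 3:
--         risk = "Low"
--     else:
--         risk = "No Risk"
--
--     return max_n_streak, risk
-- ===== SOURCE B (Python) =====
-- def compute_consecutive_night_shifts(norm_codes):
--     # Group the codes into maximal runs of equal values, then take the max
--     # length among runs of "N" (0 if there are none).
--     runs = []
--     i, n = 0, len(norm_codes)
--     while i < n:
--         j = i
--         while j < n and norm_codes[j] == norm_codes[i]:
--             j += 1
--         runs.append((norm_codes[i], j - i))
--         i = j
--
--     max_n_streak = max((length for code, length in runs if code == "N"), default=0)
--
--     if max_n_streak >= 5:
--         risk = "Critical"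
--     elif max_n_streak == 4:
--         risk = "Moderate"
--     elif max_n_streak == 3:
--         risk = "Low"
--     else:
--         risk = "No Risk"
--
--     return max_n_streak, risk
-- ===== Notes on version B (the rewrite author's own statement) =====
-- stated objective: alternative
-- what changed: Replaces the running counter with reset by a group-into-maximal-runs pass followed by a max over the lengths of the 'N' runs (group-then-reduce instead of counter-and-reset).
import Mathlib
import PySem

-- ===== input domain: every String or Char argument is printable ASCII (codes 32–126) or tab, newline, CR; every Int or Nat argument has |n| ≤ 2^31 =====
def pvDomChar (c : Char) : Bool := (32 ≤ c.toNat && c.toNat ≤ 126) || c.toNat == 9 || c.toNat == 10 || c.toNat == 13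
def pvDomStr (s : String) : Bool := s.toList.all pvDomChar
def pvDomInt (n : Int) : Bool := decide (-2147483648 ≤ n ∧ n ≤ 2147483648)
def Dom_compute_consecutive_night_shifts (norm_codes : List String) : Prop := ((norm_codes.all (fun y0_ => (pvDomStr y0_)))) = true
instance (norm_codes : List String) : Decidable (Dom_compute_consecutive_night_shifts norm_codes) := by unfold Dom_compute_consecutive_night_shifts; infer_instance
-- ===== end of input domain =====

-- B groups the codes into maximal runs and takes the max length among "N" runs,
-- instead of A's running counter with reset; same cost, different decomposition.


-- ===== PORT A =====
def compute_consecutive_night_shifts (norm_codes : List String) : Int × String :=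
  let st := norm_codes.foldl
    (fun (s : Int × Int) c =>
      if c = "N" then (max s.1 (s.2 + 1), s.2 + 1) else (s.1, (0 : Int)))
    ((0 : Int), (0 : Int))
  let max_n_streak := st.1
  let risk :=
    if 5 ≤ max_n_streak then "Critical"
    else if max_n_streak = 4 then "Moderate"
    else if max_n_streak = 3 then "Low"
    else "No Risk"
  (max_n_streak, risk)

-- ===== PORT B =====
-- the outer while loop of Source B: split into maximal runs (code, run length);
-- the inner while loop that scans the run is takeWhile/dropWhile of the tail
def pvRunsB : List String → List (String × Int)
  | [] => []
  | c :: rest =>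
      (c, 1 + ((rest.takeWhile (fun x => x = c)).length : Int)) ::
        pvRunsB (rest.dropWhile (fun x => x = c))
termination_by l => l.length
decreasing_by
  simp only [List.length_cons]
  exact Nat.lt_succ_of_le (List.length_dropWhile_le _ _)

def compute_consecutive_night_shifts_alt (norm_codes : List String) : Int × String :=
  let runs := pvRunsB norm_codes
  -- max(..., default=0) over the lengths of the "N" runs
  let max_n_streak :=
    (((runs.filter (fun r => r.1 = "N")).map (fun r => r.2)).foldl max (0 : Int))
  let risk :=
    if 5 ≤ max_n_streak then "Critical"
    else if max_n_streak = 4 then "Moderate"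
    else if max_n_streak = 3 then "Low"
    else "No Risk"
  (max_n_streak, risk)

-- ===== PRECONDITION & SPEC =====
def Spec_compute_consecutive_night_shifts (norm_codes : List String) (out : Int × String) : Prop := out = compute_consecutive_night_shifts_alt norm_codes
instance (norm_codes : List String) (out : Int × String) : Decidable (Spec_compute_consecutive_night_shifts norm_codes out) := by unfold Spec_compute_consecutive_night_shifts; infer_instance

-- ===== CLAIM (what is proved, stated in full; the proofs are below) =====
def Claim_equal_compute_consecutive_night_shifts : Prop := ∀ (norm_codes : List String), Dom_compute_consecutive_night_shifts norm_codes → Spec_compute_consecutive_night_shifts norm_codes (compute_consecutive_night_shifts norm_codes)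

-- ===== LEMMAS AND PROOFS =====

-- the best "N" streak reachable in l when the current streak has length cur
def pvH : Int → List String → Int
  | _, [] => 0
  | cur, c :: t => if c = "N" then max (cur + 1) (pvH (cur + 1) t) else pvH 0 t

theorem pvH_nil (cur : Int) : pvH cur [] = 0 := rfl

theorem pvH_cons (cur : Int) (c : String) (t : List String) :
    pvH cur (c :: t) = if c = "N" then max (cur + 1) (pvH (cur + 1) t) else pvH 0 t := rfl

theorem pvH_nonneg (l : List String) (cur : Int) : 0 ≤ pvH cur l := by
  induction l generalizing cur with
  | nil => simp [pvH_nil]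
  | cons c t ih =>
      rw [pvH_cons]
      split_ifs
      · exact le_max_of_le_right (ih _)
      · exact ih _

-- A's fold is max of the accumulator with pvH
theorem foldA_eq (l : List String) (m cur : Int) (hm : 0 ≤ m) :
    (l.foldl (fun (s : Int × Int) c =>
        if c = "N" then (max s.1 (s.2 + 1), s.2 + 1) else (s.1, (0 : Int))) (m, cur)).1
      = max m (pvH cur l) := by
  induction l generalizing m cur with
  | nil => simp [pvH_nil]; omega
  | cons c t ih =>
      simp only [List.foldl_cons]
      rw [pvH_cons]
      by_cases hc : c = "N"
      · simp only [if_pos hc]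
        rw [ih (max m (cur + 1)) (cur + 1) (by omega)]
        omega
      · simp only [if_neg hc]
        exact ih m 0 hm

theorem foldl_max_union (l : List Int) (a b : Int) :
    l.foldl max (max a b) = max a (l.foldl max b) := by
  induction l generalizing b with
  | nil => rfl
  | cons x t ih =>
      simp only [List.foldl_cons, max_assoc]
      exact ih (max b x)

theorem pvH_N_run (s : List String) (rest : List String) (cur : Int)
    (hs : ∀ x ∈ s, x = "N") :
    pvH cur (("N" :: s) ++ rest)
      = max (cur + 1 + (s.length : Int)) (pvH (cur + 1 + (s.length : Int)) rest) := by
  induction s generalizing cur with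
  | nil => simp [pvH_cons]
  | cons x s' ih =>
      have hx : x = "N" := hs x (by simp)
      have hs' : ∀ y ∈ s', y = "N" := fun y hy => hs y (List.mem_cons_of_mem _ hy)
      subst hx
      rw [show (cur + 1 + ((("N" :: s' : List String)).length : Int))
            = cur + 1 + 1 + ((s' : List String).length : Int) from by
          push_cast [List.length_cons]; ring]
      rw [List.cons_append, pvH_cons, if_pos rfl, ih (cur + 1) hs']
      omega

theorem pvH_other_run (s : List String) (rest : List String) (cur : Int)
    (hs : ∀ x ∈ s, x ≠ "N") (hne : s ≠ []) :
    pvH cur (s ++ rest) = pvH 0 rest := by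
  induction s generalizing cur with
  | nil => exact absurd rfl hne
  | cons x s' ih =>
      have hx : x ≠ "N" := hs x (by simp)
      rw [List.cons_append, pvH_cons, if_neg hx]
      cases s' with
      | nil => simp
      | cons y t =>
          exact ih 0 (fun z hz => hs z (List.mem_cons_of_mem _ hz)) (by simp)

-- pvH with a fresh streak equals B's group-then-reduce value
theorem pvH_eq_alt (l : List String) :
    pvH 0 l
      = (((pvRunsB l).filter (fun r => r.1 = "N")).map (fun r => r.2)).foldl max (0 : Int) := by
  cases l with
  | nil => simp [pvH, pvRunsB]
  | cons c rest =>
      have hsplit : rest.takeWhile (fun x => x = c) ++ rest.dropWhile (fun x => x = c) = rest :=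
        List.takeWhile_append_dropWhile
      have hrec := pvH_eq_alt (rest.dropWhile (fun x => x = c))
      by_cases hc : c = "N"
      · -- first run is an "N" run
        have hall : ∀ x ∈ rest.takeWhile (fun x => x = c), x = "N" := by
          intro x hx
          have := List.mem_takeWhile_imp hx
          simp only [decide_eq_true_eq] at this
          rw [this, hc]
        have hhead : pvH (0 + 1 + ((rest.takeWhile (fun x => x = c)).length : Int))
            (rest.dropWhile (fun x => x = c)) = pvH 0 (rest.dropWhile (fun x => x = c)) := by
          cases hdrop : rest.dropWhile (fun x => x = c) with
          | nil => simp [pvH]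
          | cons y t =>
              have hy : ¬ (y = c) := by
                have := List.head?_dropWhile_not (fun x => decide (x = c)) rest
                rw [show rest.dropWhile (fun x => decide (x = c)) = y :: t from hdrop] at this
                simpa using this
              have hy' : y ≠ "N" := by rw [hc] at hy; exact hy
              simp [pvH, if_neg hy']
        calc pvH 0 (c :: rest)
            = pvH 0 (("N" :: rest.takeWhile (fun x => x = c)) ++ rest.dropWhile (fun x => x = c)) := by
              rw [hc] at hsplit ⊢; rw [List.cons_append, hsplit]
          _ = max (0 + 1 + ((rest.takeWhile (fun x => x = c)).length : Int))
                (pvH 0 (rest.dropWhile (fun x => x = c))) := by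
              rw [pvH_N_run _ _ _ hall, hhead]
          _ = _ := by
              rw [hrec]
              simp only [pvRunsB, hc, List.filter_cons, if_pos, List.map_cons, List.foldl_cons,
                decide_eq_true_eq]
              have h1 : (0 : Int) ⊔ (1 + ((rest.takeWhile (fun x => x = "N")).length : Int))
                  = (1 + ((rest.takeWhile (fun x => x = "N")).length : Int)) ⊔ 0 := max_comm _ _
              rw [h1, foldl_max_union]
              omega
      · -- first run is filtered out
        have hall : ∀ x ∈ c :: rest.takeWhile (fun x => x = c), x ≠ "N" := by
          intro x hx
          rcases List.mem_cons.mp hx with h | h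
          · rw [h]; exact hc
          · have := List.mem_takeWhile_imp h
            simp only [decide_eq_true_eq] at this
            rw [this]; exact hc
        calc pvH 0 (c :: rest)
            = pvH 0 ((c :: rest.takeWhile (fun x => x = c)) ++ rest.dropWhile (fun x => x = c)) := by
              rw [List.cons_append, hsplit]
          _ = pvH 0 (rest.dropWhile (fun x => x = c)) :=
              pvH_other_run _ _ _ hall (by simp)
          _ = _ := by
              rw [hrec]
              simp [pvRunsB, hc]
termination_by l.length
decreasing_by
  all_goals
    simp only [List.length_cons]
    exact Nat.lt_succ_of_le (List.length_dropWhile_le _ _)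

-- ===== VERDICT (by name: the statement is the Claim_ definition above) =====
theorem compute_consecutive_night_shifts_spec : Claim_equal_compute_consecutive_night_shifts := by
  intro l _
  unfold Spec_compute_consecutive_night_shifts compute_consecutive_night_shifts
    compute_consecutive_night_shifts_alt
  simp only
  rw [foldA_eq l 0 0 le_rfl, pvH_eq_alt l]
  have := pvH_nonneg l 0
  rw [max_eq_right (by rw [pvH_eq_alt l] at this; exact this)]
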